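-- pv_equiv track=rewrite | github.com/Arsen1302/Code-copy-detector | TestData/solutions/problem_665_5.py | solution_665_5
-- ===== SOURCE A (Python) =====
-- from typing import List
--
-- def solution_665_5(nums: List[int], queries: List[List[int]]) -> List[int]:
--     res=[]
--     cur_sum=sum([i for i in nums if not i%2])
--     for q in queries:
--         if not nums[q[1]]%2:
--             cur_sum-=nums[q[1]]
--         nums[q[1]]+=q[0]
--         if not nums[q[1]]%2:
--             cur_sum+=nums[q[1]]
--         res.append(cur_sum)
--     return res
-- ===== SOURCE B (Python) =====
-- def solution_665_5(nums, queries):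
--     res = []
--     for q in queries:
--         nums[q[1]] += q[0]
--         res.append(sum(x for x in nums if x % 2 == 0))
--     return res
-- ===== Notes on version B (the rewrite author's own statement) =====
-- stated objective: simpler
-- what changed: B drops A's incremental subtract-then-add running-sum bookkeeping and instead recomputes the even-sum of the whole array from scratch after each update.
import Mathlib
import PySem

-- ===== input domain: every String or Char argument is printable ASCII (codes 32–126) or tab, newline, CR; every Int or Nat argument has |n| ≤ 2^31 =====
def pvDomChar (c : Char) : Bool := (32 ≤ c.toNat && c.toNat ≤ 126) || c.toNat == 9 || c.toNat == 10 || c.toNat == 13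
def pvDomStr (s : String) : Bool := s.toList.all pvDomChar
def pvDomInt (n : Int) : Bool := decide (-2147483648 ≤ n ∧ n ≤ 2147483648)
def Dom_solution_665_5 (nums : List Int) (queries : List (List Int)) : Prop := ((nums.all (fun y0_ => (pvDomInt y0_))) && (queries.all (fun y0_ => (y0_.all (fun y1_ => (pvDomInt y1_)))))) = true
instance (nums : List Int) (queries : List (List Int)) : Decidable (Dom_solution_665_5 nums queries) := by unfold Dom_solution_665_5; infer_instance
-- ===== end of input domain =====

-- B recomputes the even-sum of the array from scratch after each update instead of A's
-- incremental subtract-then-add running-sum bookkeeping (objective: simpler; not faster).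
-- Both Pythons mutate `nums` in place identically; the equivalence proved is about the return value.

-- ===== PORT A =====
def pvStepA (st : List Int × Int × List Int) (q : List Int) : List Int × Int × List Int :=
  let ns := st.1
  let j := PySem.List.pyGetD q 1 0
  let old := PySem.List.pyGetD ns j 0
  let cur1 := if PySem.Int.mod old 2 = 0 then st.2.1 - old else st.2.1
  let ns' := PySem.List.pySetD ns j (old + PySem.List.pyGetD q 0 0)
  let nw := PySem.List.pyGetD ns' j 0
  let cur2 := if PySem.Int.mod nw 2 = 0 then cur1 + nw else cur1
  (ns', cur2, st.2.2 ++ [cur2])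

def solution_665_5 (nums : List Int) (queries : List (List Int)) : List Int :=
  (queries.foldl pvStepA (nums, ((nums.filter fun i => PySem.Int.mod i 2 = 0).sum), [])).2.2

-- ===== PORT B =====
def pvStepB (st : List Int × List Int) (q : List Int) : List Int × List Int :=
  let j := PySem.List.pyGetD q 1 0
  let ns := PySem.List.pySetD st.1 j (PySem.List.pyGetD st.1 j 0 + PySem.List.pyGetD q 0 0)
  (ns, st.2 ++ [(ns.filter fun x => PySem.Int.mod x 2 = 0).sum])

def solution_665_5_alt (nums : List Int) (queries : List (List Int)) : List Int :=
  (queries.foldl pvStepB (nums, [])).2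

-- ===== PRECONDITION & SPEC =====
-- A raises IndexError when a query has fewer than two elements or its target index q[1] is out of
-- range for nums (negative Python indices count from the end and are admitted); exactly those inputs are excluded.
def Pre_solution_665_5 (nums : List Int) (queries : List (List Int)) : Prop :=
  ∀ q ∈ queries, 2 ≤ q.length ∧ PySem.Raise.InRange nums.length (PySem.List.pyGetD q 1 0)
instance (nums : List Int) (queries : List (List Int)) : Decidable (Pre_solution_665_5 nums queries) := by unfold Pre_solution_665_5; infer_instance

def pvWitness_solution_665_5 : List Int × List (List Int) := ([1, 2, 3, 4], [[1, 0], [-3, 1], [-4, -1], [2, 3]])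

def Spec_solution_665_5 (nums : List Int) (queries : List (List Int)) (out : List Int) : Prop := out = solution_665_5_alt nums queries
instance (nums : List Int) (queries : List (List Int)) (out : List Int) : Decidable (Spec_solution_665_5 nums queries out) := by unfold Spec_solution_665_5; infer_instance

-- ===== CLAIM (what is proved, stated in full; the proofs are below) =====
def Claim_equal_solution_665_5 : Prop := ∀ (nums : List Int) (queries : List (List Int)), Dom_solution_665_5 nums queries → Pre_solution_665_5 nums queries → Spec_solution_665_5 nums queries (solution_665_5 nums queries)

-- ===== LEMMAS AND PROOFS =====

def pvEvenSum (xs : List Int) : Int := (xs.filter fun x => PySem.Int.mod x 2 = 0).sum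

theorem pvEvenSum_cons (a : Int) (xs : List Int) :
    pvEvenSum (a :: xs) = (if PySem.Int.mod a 2 = 0 then a else 0) + pvEvenSum xs := by
  simp only [pvEvenSum, List.filter]
  split_ifs with h
  · simp_all
  · simp_all

theorem pvEvenSum_set (xs : List Int) (n : Nat) (v : Int) (h : n < xs.length) :
    pvEvenSum (xs.set n v) + (if PySem.Int.mod xs[n] 2 = 0 then xs[n] else 0)
      = pvEvenSum xs + (if PySem.Int.mod v 2 = 0 then v else 0) := by
  induction xs generalizing n with
  | nil => simp at h
  | cons a xs ih =>
    cases n with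
    | zero =>
      simp only [List.set, List.getElem_cons_zero, pvEvenSum_cons]
      omega
    | succ n =>
      have := ih n (by simpa using h)
      simp only [List.set, List.getElem_cons_succ, pvEvenSum_cons]
      omega

theorem pvSetD_neg (xs : List Int) (j v : Int) (h1 : -(xs.length:Int) ≤ j) (h2 : j < 0) :
    PySem.List.pySetD xs j v = xs.set ((xs.length:Int) + j).toNat v := by
  simp only [PySem.List.pySetD, PySem.List.pySet?, PySem.List.pyIdx?]
  split_ifs with h h'
  all_goals first
    | omega
    | (show xs.set (xs.length - (-j).toNat) v = xs.set ((xs.length:Int) + j).toNat v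
       congr 1
       omega)

theorem pvGetD_neg (xs : List Int) (j d : Int) (h1 : -(xs.length:Int) ≤ j) (h2 : j < 0)
    (h3 : ((xs.length:Int)+j).toNat < xs.length) :
    PySem.List.pyGetD xs j d = xs[((xs.length:Int) + j).toNat] := by
  have h := PySem.List.pyGetD_neg_natCast (xs:=xs) (k:=(-j).toNat) (d:=d) (by omega) (by omega)
  have hidx : xs.length - (-j).toNat = ((xs.length:Int) + j).toNat := by omega
  simp only [hidx] at h
  rw [show (-(((-j).toNat:Int))) = j by omega] at h
  exact h

-- the normalized natural index of a Python index j into a list of length len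
def pvIdx (len : Nat) (j : Int) : Nat := if 0 ≤ j then j.toNat else ((len:Int) + j).toNat

theorem pvIdx_lt (len : Nat) (j : Int) (h : PySem.Raise.InRange len j) : pvIdx len j < len := by
  simp only [PySem.Raise.InRange] at h
  simp only [pvIdx]
  split_ifs <;> omega

theorem pvGetD_norm (xs : List Int) (j d : Int) (h : PySem.Raise.InRange xs.length j) :
    PySem.List.pyGetD xs j d = xs[pvIdx xs.length j]'(pvIdx_lt _ _ h) := by
  have h' := h
  simp only [PySem.Raise.InRange] at h'
  by_cases hj : 0 ≤ j
  · have := PySem.List.pyGetD_eq_getElem (xs:=xs) (i:=j) (d:=d) hj (by exact_mod_cast h'.2)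
    simp only [pvIdx, if_pos hj]
    exact this
  · have hlt := pvIdx_lt xs.length j h
    simp only [pvIdx, if_neg hj] at hlt ⊢
    exact pvGetD_neg xs j d (by omega) (by omega) hlt

theorem pvSetD_norm (xs : List Int) (j v : Int) (h : PySem.Raise.InRange xs.length j) :
    PySem.List.pySetD xs j v = xs.set (pvIdx xs.length j) v := by
  have h' := h
  simp only [PySem.Raise.InRange] at h'
  by_cases hj : 0 ≤ j
  · rw [PySem.List.pySetD_of_nonneg (h:=hj)]
    simp [pvIdx, hj]
  · simp only [pvIdx, if_neg hj]
    exact pvSetD_neg xs j v (by omega) (by omega)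

-- one step of A, started with the correct running even-sum, produces B's step plus the correct new even-sum
theorem pvStep_eq (ns res : List Int) (q : List Int)
    (hr : PySem.Raise.InRange ns.length (PySem.List.pyGetD q 1 0)) :
    pvStepA (ns, pvEvenSum ns, res) q
      = ((pvStepB (ns, res) q).1, pvEvenSum (pvStepB (ns, res) q).1, (pvStepB (ns, res) q).2) := by
  simp only [pvStepA, pvStepB]
  set j := PySem.List.pyGetD q 1 0 with hj
  set m := pvIdx ns.length j with hm
  have hmlt : m < ns.length := pvIdx_lt _ _ hr
  set v := PySem.List.pyGetD ns j 0 + PySem.List.pyGetD q 0 0 with hv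
  have hget : PySem.List.pyGetD ns j 0 = ns[m] := pvGetD_norm ns j 0 hr
  have hset : PySem.List.pySetD ns j v = ns.set m v := pvSetD_norm ns j v hr
  have hr' : PySem.Raise.InRange (ns.set m v).length j := by
    simpa [List.length_set] using hr
  have hget' : PySem.List.pyGetD (PySem.List.pySetD ns j v) j 0 = v := by
    rw [hset, pvGetD_norm _ j 0 hr']
    simp only [List.length_set, ← hm]
    exact List.getElem_set_self (by simpa using hmlt)
  have hsum := pvEvenSum_set ns m v hmlt
  have hfil : ((ns.set m v).filter fun x => PySem.Int.mod x 2 = 0).sum = pvEvenSum (ns.set m v) := rfl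
  have hget2 : PySem.List.pyGetD (ns.set m v) j 0 = v := by rw [← hset]; exact hget'
  simp only [hset, hget2, hget, hfil]
  refine congrArg₂ Prod.mk rfl (congrArg₂ Prod.mk ?_ ?_)
  · split_ifs at hsum ⊢ <;> omega
  · congr 1
    congr 1
    split_ifs at hsum ⊢ <;> omega

theorem pv_loop (queries : List (List Int)) (ns res : List Int)
    (hq : ∀ q ∈ queries, PySem.Raise.InRange ns.length (PySem.List.pyGetD q 1 0)) :
    (queries.foldl pvStepA (ns, pvEvenSum ns, res)).2.2
      = (queries.foldl pvStepB (ns, res)).2 := by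
  induction queries generalizing ns res with
  | nil => rfl
  | cons q qs ih =>
    have hr := hq q (List.mem_cons_self)
    simp only [List.foldl_cons, pvStep_eq ns res q hr]
    have hlen : (pvStepB (ns, res) q).1.length = ns.length := by
      simp only [pvStepB, PySem.List.length_pySetD]
    exact ih (pvStepB (ns, res) q).1 (pvStepB (ns, res) q).2
      (fun q' hq' => by rw [hlen]; exact hq q' (List.mem_cons_of_mem _ hq'))

-- ===== VERDICT (by name: the statement is the Claim_ definition above) =====
theorem solution_665_5_spec : Claim_equal_solution_665_5 := by
  intro nums queries _ hpre
  unfold Spec_solution_665_5 solution_665_5 solution_665_5_alt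
  exact pv_loop queries nums [] (fun q hq => (hpre q hq).2)
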